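-- pv_equiv track=rewrite | github.com/COGS18/COGS18.github.io | _build/jupyter_execute/materials/ExamPrep/E2_Sp23_Practice.py | write_tickets
-- ===== SOURCE A (Python) =====
-- def write_tickets(input_dict):
--     output_dict = {}
--
--     for key in input_dict:
--         zone = input_dict[key][0]
--         speed = input_dict[key][1]
--
--         if zone == 'private' and speed > 5:
--             output_dict[key] = True
--         elif zone == 'local' and speed > 25:
--             output_dict[key] = True
--         elif zone == 'highway' and speed > 65:
--             output_dict[key] = True
--         else:
--             output_dict[key] = False
--
--     return output_dict
-- ===== SOURCE B (Python) =====
-- RULES = [('private', 5), ('local', 25), ('highway', 65)]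
--
--
-- def write_tickets(input_dict):
--     # Start with no tickets, then apply each speeding rule in its own pass,
--     # flagging every entry of that zone that exceeds the rule's limit.
--     output = {key: False for key in input_dict}
--     for rule_zone, limit in RULES:
--         for key, (zone, speed) in input_dict.items():
--             if zone == rule_zone and speed > limit:
--                 output[key] = True
--     return output
-- ===== Notes on version B (the rewrite author's own statement) =====
-- stated objective: alternative
-- what changed: Instead of one pass with a per-entry if/elif chain, B initialises all keys to False and then makes one sweep per speeding rule from a rules table, overwriting only the entries that rule flags (rule-driven staged passes, control flow turned into data).
import Mathlib
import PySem

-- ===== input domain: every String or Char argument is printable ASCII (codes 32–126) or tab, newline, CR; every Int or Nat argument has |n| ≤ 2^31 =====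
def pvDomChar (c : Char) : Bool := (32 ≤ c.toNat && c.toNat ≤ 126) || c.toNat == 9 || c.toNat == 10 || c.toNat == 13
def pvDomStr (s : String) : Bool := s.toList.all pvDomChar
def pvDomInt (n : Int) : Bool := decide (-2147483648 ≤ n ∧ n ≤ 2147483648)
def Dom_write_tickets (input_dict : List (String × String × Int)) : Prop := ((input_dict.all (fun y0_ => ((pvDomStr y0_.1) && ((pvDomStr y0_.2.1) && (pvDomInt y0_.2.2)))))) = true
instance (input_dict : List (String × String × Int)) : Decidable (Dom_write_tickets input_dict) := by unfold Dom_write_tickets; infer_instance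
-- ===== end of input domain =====

-- B replaces A's single pass with an if/elif chain by rule-driven staged passes:
-- all keys start False, then one sweep per (zone, limit) rule flags the speeders (alternative, same cost).

-- ===== PORT A =====
-- for key in input_dict: zone = input_dict[key][0]; speed = input_dict[key][1]; if/elif chain; output_dict[key] = …
def write_tickets (input_dict : List (String × String × Int)) : List (String × Bool) :=
  (input_dict.foldl
    (fun (output_dict : PySem.Dict String Bool) kv =>
      let v := PySem.Dict.getD (PySem.Dict.mk input_dict) kv.1 ("", 0)
      let zone := v.1
      let speed := v.2
      if zone = "private" ∧ 5 < speed then output_dict.insert kv.1 true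
      else if zone = "local" ∧ 25 < speed then output_dict.insert kv.1 true
      else if zone = "highway" ∧ 65 < speed then output_dict.insert kv.1 true
      else output_dict.insert kv.1 false)
    PySem.Dict.empty).items

-- ===== PORT B =====
-- RULES = [('private', 5), ('local', 25), ('highway', 65)]
def pvRules : List (String × Int) := [("private", 5), ("local", 25), ("highway", 65)]

-- output = {key: False for key in input_dict}; for rule in RULES: for key,(zone,speed) in items(): if … : output[key] = True
def write_tickets_alt (input_dict : List (String × String × Int)) : List (String × Bool) :=
  (pvRules.foldl
    (fun (out : PySem.Dict String Bool) rule =>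
      input_dict.foldl
        (fun out kv =>
          if kv.2.1 = rule.1 ∧ rule.2 < kv.2.2 then out.insert kv.1 true else out)
        out)
    (input_dict.foldl
      (fun (out : PySem.Dict String Bool) kv => out.insert kv.1 false)
      PySem.Dict.empty)).items

-- ===== PRECONDITION & SPEC =====
-- The argument is a Python dict; Pre_ excludes association lists with duplicate keys, which do not
-- represent any Python dict (every dict literal/value has distinct keys), so A never receives them.
def Pre_write_tickets (input_dict : List (String × String × Int)) : Prop :=
  (input_dict.map Prod.fst).Nodup
instance (input_dict : List (String × String × Int)) : Decidable (Pre_write_tickets input_dict) := by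
  unfold Pre_write_tickets; infer_instance

def pvWitness_write_tickets : (List (String × String × Int)) :=
  [("x", "private", 10), ("y", "local", 3), ("z", "school", 99)]

def Spec_write_tickets (input_dict : List (String × String × Int)) (out : List (String × Bool)) : Prop := out = write_tickets_alt input_dict
instance (input_dict : List (String × String × Int)) (out : List (String × Bool)) : Decidable (Spec_write_tickets input_dict out) := by unfold Spec_write_tickets; infer_instance

-- ===== CLAIM (what is proved, stated in full; the proofs are below) =====
def Claim_equal_write_tickets : Prop := ∀ (input_dict : List (String × String × Int)), Dom_write_tickets input_dict → Pre_write_tickets input_dict → Spec_write_tickets input_dict (write_tickets input_dict)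

-- ===== LEMMAS AND PROOFS =====

-- The ticket flag A's if/elif chain assigns to an entry (zone, speed).
def pvTicket (kv : String × String × Int) : Bool :=
  if kv.2.1 = "private" ∧ 5 < kv.2.2 then true
  else if kv.2.1 = "local" ∧ 25 < kv.2.2 then true
  else if kv.2.1 = "highway" ∧ 65 < kv.2.2 then true
  else false

-- A's result as a map (per-key lookup resolves to the entry's own value under Nodup keys).
lemma write_tickets_eq_map (input_dict : List (String × String × Int))
    (hnd : (input_dict.map Prod.fst).Nodup) :
    write_tickets input_dict = input_dict.map (fun kv => (kv.1, pvTicket kv)) := by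
  have hstep : ∀ (acc : PySem.Dict String Bool) (kv : String × String × Int), kv ∈ input_dict →
      (let v := PySem.Dict.getD (PySem.Dict.mk input_dict) kv.1 ("", 0)
       let zone := v.1
       let speed := v.2
       if zone = "private" ∧ 5 < speed then acc.insert kv.1 true
       else if zone = "local" ∧ 25 < speed then acc.insert kv.1 true
       else if zone = "highway" ∧ 65 < speed then acc.insert kv.1 true
       else acc.insert kv.1 false)
      = acc.insert kv.1 (pvTicket kv) := by
    intro acc kv hmem
    obtain ⟨k, z, s⟩ := kv
    have hlook : PySem.Dict.getD (PySem.Dict.mk input_dict) k ("", 0) = (z, s) :=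
      PySem.Dict.getD_of_mem_items (PySem.Dict.mk input_dict) hmem hnd ("", 0)
    simp only [hlook]
    by_cases h1 : z = "private" ∧ (5 : Int) < s <;>
      by_cases h2 : z = "local" ∧ (25 : Int) < s <;>
        by_cases h3 : z = "highway" ∧ (65 : Int) < s <;>
          simp [pvTicket, h1, h2, h3]
  unfold write_tickets
  rw [PySem.List.foldl_congr_mem input_dict _ _ PySem.Dict.empty hstep]
  rw [PySem.Dict.items_foldl_insert_fresh input_dict (fun kv => kv.1) (fun kv => pvTicket kv)
    PySem.Dict.empty (by intro a _; simp) (by simpa using hnd)]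
  simp [PySem.Dict.empty]

-- One initialising pass: every key's value (and the default) is false.
lemma init_getD (l : List (String × String × Int)) (d : PySem.Dict String Bool) (k : String)
    (h : d.getD k false = false) :
    (l.foldl (fun out kv => out.insert kv.1 false) d).getD k false = false := by
  induction l generalizing d with
  | nil => simpa using h
  | cons hd tl ih =>
    simp only [List.foldl_cons]
    exact ih _ (by rw [PySem.Dict.getD_insert]; split <;> simp [h])

-- One rule pass: the final value of k is its old value OR-ed with "some entry with key k satisfies p".
lemma pass_getD (l : List (String × String × Int)) (p : (String × String × Int) → Prop)
    [DecidablePred p] (d : PySem.Dict String Bool) (k : String) :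
    (l.foldl (fun out kv => if p kv then out.insert kv.1 true else out) d).getD k false
      = (d.getD k false || l.any (fun kv => kv.1 == k && decide (p kv))) := by
  induction l generalizing d with
  | nil => simp
  | cons hd tl ih =>
    simp only [List.foldl_cons, List.any_cons]
    by_cases hp : p hd
    · rw [ih]
      by_cases hk : k = hd.1
      · simp [hp, hk, Bool.or_comm]
      · simp [PySem.Dict.getD_insert, hp, hk, Ne.symm hk, Bool.or_left_comm]
    · rw [ih]; simp [hp]

-- A rule pass only overwrites keys already present, so the key list is unchanged.
lemma pass_keys (l : List (String × String × Int)) (p : (String × String × Int) → Prop)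
    [DecidablePred p] (d : PySem.Dict String Bool)
    (h : ∀ kv ∈ l, kv.1 ∈ d.keys) :
    (l.foldl (fun out kv => if p kv then out.insert kv.1 true else out) d).keys = d.keys := by
  induction l generalizing d with
  | nil => rfl
  | cons hd tl ih =>
    simp only [List.foldl_cons]
    by_cases hp : p hd
    · rw [if_pos hp]
      have hc : d.contains hd.1 = true :=
        (PySem.Dict.contains_iff_mem_keys _ _).2 (h hd (List.mem_cons_self ..))
      rw [ih _ (by
        intro kv hkv
        rw [PySem.Dict.mem_keys_insert]
        exact Or.inr (h kv (List.mem_cons_of_mem _ hkv)))]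
      exact PySem.Dict.keys_insert_of_contains _ _ hc
    · rw [if_neg hp]
      exact ih _ (fun kv hkv => h kv (List.mem_cons_of_mem _ hkv))

-- Under Nodup keys, the only entry of l whose key is kv.1 is kv itself.
lemma any_key_eq (l : List (String × String × Int)) (kv : String × String × Int)
    (hnd : (l.map Prod.fst).Nodup) (hmem : kv ∈ l) (q : (String × String × Int) → Bool) :
    l.any (fun kv' => kv'.1 == kv.1 && q kv') = q kv := by
  induction l with
  | nil => simp at hmem
  | cons hd tl ih =>
    simp only [List.map_cons, List.nodup_cons] at hnd
    simp only [List.any_cons]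
    rcases List.mem_cons.1 hmem with rfl | hmem'
    · have htl : tl.any (fun kv' => kv'.1 == kv.1 && q kv') = false := by
        simp only [List.any_eq_false]
        intro kv' hkv'
        have : kv'.1 ≠ kv.1 := fun he => hnd.1 (he ▸ List.mem_map_of_mem hkv')
        simp [this]
      simp [htl]
    · have hne : hd.1 ≠ kv.1 := fun he => hnd.1 (he ▸ List.mem_map_of_mem hmem')
      simp [hne, ih hnd.2 hmem']

-- The whole rules loop, keys: every pass only overwrites present keys.
lemma rules_fold_keys (rules : List (String × Int)) (input : List (String × String × Int))
    (d : PySem.Dict String Bool) (h : ∀ kv ∈ input, kv.1 ∈ d.keys) :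
    (rules.foldl
      (fun out rule =>
        input.foldl
          (fun out kv => if kv.2.1 = rule.1 ∧ rule.2 < kv.2.2 then out.insert kv.1 true else out)
          out)
      d).keys = d.keys := by
  induction rules generalizing d with
  | nil => rfl
  | cons hd tl ih =>
    simp only [List.foldl_cons]
    rw [ih _ (fun kv hkv => by rw [pass_keys input _ d h]; exact h kv hkv),
        pass_keys input _ d h]

-- The whole rules loop, values: k's final value is its old value OR-ed over all rules.
lemma rules_fold_getD (rules : List (String × Int)) (input : List (String × String × Int))
    (d : PySem.Dict String Bool) (k : String) :
    (rules.foldl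
      (fun out rule =>
        input.foldl
          (fun out kv => if kv.2.1 = rule.1 ∧ rule.2 < kv.2.2 then out.insert kv.1 true else out)
          out)
      d).getD k false
    = (d.getD k false ||
        rules.any (fun rule =>
          input.any (fun kv => kv.1 == k && decide (kv.2.1 = rule.1 ∧ rule.2 < kv.2.2)))) := by
  induction rules generalizing d with
  | nil => simp
  | cons hd tl ih =>
    simp only [List.foldl_cons, List.any_cons]
    rw [ih, pass_getD, Bool.or_assoc]

-- B's result as the same map.
lemma alt_eq_map (input : List (String × String × Int))
    (hnd : (input.map Prod.fst).Nodup) :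
    write_tickets_alt input = input.map (fun kv => (kv.1, pvTicket kv)) := by
  unfold write_tickets_alt
  have h0keys : (input.foldl (fun (out : PySem.Dict String Bool) kv => out.insert kv.1 false)
      PySem.Dict.empty).keys = input.map Prod.fst := by
    have h0items := PySem.Dict.items_foldl_insert_fresh input (fun kv => kv.1) (fun _ => false)
      PySem.Dict.empty (by intro a _; simp) (by simpa using hnd)
    simp only [PySem.Dict.keys, h0items, List.map_map, List.map_append]
    simp [PySem.Dict.empty]
  have hmemkeys : ∀ kv ∈ input, kv.1 ∈ (input.foldl
      (fun (out : PySem.Dict String Bool) kv => out.insert kv.1 false) PySem.Dict.empty).keys := by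
    intro kv hkv; rw [h0keys]; exact List.mem_map_of_mem hkv
  have hkeys := rules_fold_keys pvRules input _ hmemkeys
  rw [h0keys] at hkeys
  rw [PySem.Dict.items_eq_map_keys _ (hkeys ▸ hnd) false, hkeys, List.map_map]
  refine List.map_congr_left (fun kv hkv => ?_)
  simp only [Function.comp_apply]
  have hg : (pvRules.foldl
      (fun out rule =>
        input.foldl
          (fun out kv => if kv.2.1 = rule.1 ∧ rule.2 < kv.2.2 then out.insert kv.1 true else out)
          out)
      (input.foldl (fun (out : PySem.Dict String Bool) kv => out.insert kv.1 false)
        PySem.Dict.empty)).getD kv.1 false = pvTicket kv := by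
    rw [rules_fold_getD, init_getD input PySem.Dict.empty kv.1 (PySem.Dict.getD_empty _ _)]
    have hany : ∀ rule : String × Int,
        input.any (fun kv' => kv'.1 == kv.1 && decide (kv'.2.1 = rule.1 ∧ rule.2 < kv'.2.2))
          = decide (kv.2.1 = rule.1 ∧ rule.2 < kv.2.2) :=
      fun rule => any_key_eq input kv hnd hkv _
    simp only [hany, pvRules, List.any_cons, List.any_nil, Bool.false_or, Bool.or_false]
    by_cases h1 : kv.2.1 = "private" ∧ (5 : Int) < kv.2.2 <;>
      by_cases h2 : kv.2.1 = "local" ∧ (25 : Int) < kv.2.2 <;>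
        by_cases h3 : kv.2.1 = "highway" ∧ (65 : Int) < kv.2.2 <;>
          simp [pvTicket, h1, h2, h3]
  rw [hg]

-- ===== VERDICT (by name: the statement is the Claim_ definition above) =====
theorem write_tickets_spec : Claim_equal_write_tickets := by
  intro input_dict _hdom hpre
  unfold Spec_write_tickets
  rw [write_tickets_eq_map input_dict hpre, alt_eq_map input_dict hpre]
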